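-- pv_equiv track=rewrite | github.com/Lortas102066/Python-Basic | week11/workshop11.py | bounded_lists
-- ===== SOURCE A (Python) =====
-- def bounded_lists(upper_bounds):
--     """
--     Input: List of positive integers of length 'n'
--     Output: List of lists where i, lst[i] <= upper_bound[i]
--
--     >>> bounded_lists([1, 1, 2])
--     [[0, 0, 0], [0, 0, 1], [0, 0, 2], [0, 1, 0], [0, 1, 1], [0, 1, 2], [1, 0, 0], [1, 0, 1], [1, 0, 2], [1, 1, 0], [1, 1, 1], [1, 1, 2]]
--     """
--     pass
--     if not upper_bounds:
--         return [[]]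
--
--     else:
--         answer = []
--
--         for list in bounded_lists(upper_bounds[:-1]):
--             for i in range(upper_bounds[-1] + 1):
--                 answer.append(list + [i])
--         return answer
-- ===== SOURCE B (Python) =====
-- def bounded_lists(upper_bounds):
--     result = [[]]
--     for b in upper_bounds:
--         result = [r + [i] for r in result for i in range(b + 1)]
--     return result
-- ===== Notes on version B (the rewrite author's own statement) =====
-- stated objective: alternative
-- what changed: Replaces recursion on upper_bounds[:-1] (which rebuilds sliced list copies at every level) with a single left-to-right fold that extends an accumulated result list by one bound per step.
import Mathlib
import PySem

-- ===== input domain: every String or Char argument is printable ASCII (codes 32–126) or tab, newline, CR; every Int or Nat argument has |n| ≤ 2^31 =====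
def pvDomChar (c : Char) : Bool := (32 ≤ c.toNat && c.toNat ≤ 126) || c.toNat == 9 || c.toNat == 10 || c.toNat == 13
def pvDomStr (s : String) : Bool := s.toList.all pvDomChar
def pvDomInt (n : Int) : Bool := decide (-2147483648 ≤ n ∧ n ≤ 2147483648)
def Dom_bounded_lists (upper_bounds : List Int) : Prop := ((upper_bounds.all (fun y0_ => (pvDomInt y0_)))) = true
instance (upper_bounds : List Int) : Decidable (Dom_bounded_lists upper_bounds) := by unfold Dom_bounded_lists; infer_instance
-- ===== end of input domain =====

-- B replaces A's recursion on upper_bounds[:-1] with a left-to-right fold over the bounds (alternative decomposition, same cost class).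

-- ===== PORT A =====
-- A: recurse on upper_bounds[:-1], then append list + [i] for i in range(last + 1).
def bounded_lists (upper_bounds : List Int) : List (List Int) :=
  match h : upper_bounds with
  | [] => [[]]
  | _ :: _ =>
    (bounded_lists upper_bounds.dropLast).foldl
      (fun answer l =>
        (PySem.List.pyRange 0 (upper_bounds.getLast (by simp [h]) + 1) 1).foldl
          (fun answer i => answer ++ [l ++ [i]]) answer) []
termination_by upper_bounds.length
decreasing_by simp [h, List.length_dropLast]

-- ===== PORT B =====
-- B: result = [[]]; for each bound b, result = [r + [i] for r in result for i in range(b+1)].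
def bounded_lists_alt (upper_bounds : List Int) : List (List Int) :=
  upper_bounds.foldl
    (fun result b => result.flatMap (fun r => (PySem.List.pyRange 0 (b + 1) 1).map (fun i => r ++ [i])))
    [[]]

-- ===== PRECONDITION & SPEC =====
def Spec_bounded_lists (upper_bounds : List Int) (out : List (List Int)) : Prop := out = bounded_lists_alt upper_bounds
instance (upper_bounds : List Int) (out : List (List Int)) : Decidable (Spec_bounded_lists upper_bounds out) := by unfold Spec_bounded_lists; infer_instance

-- ===== CLAIM (what is proved, stated in full; the proofs are below) =====
def Claim_equal_bounded_lists : Prop := ∀ (upper_bounds : List Int), Dom_bounded_lists upper_bounds → Spec_bounded_lists upper_bounds (bounded_lists upper_bounds)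

-- ===== LEMMAS AND PROOFS =====

-- A's double foldl-with-append over one level equals B's flatMap step.
theorem bl_step_eq (res : List (List Int)) (b : Int) :
    res.foldl
      (fun answer l =>
        (PySem.List.pyRange 0 (b + 1) 1).foldl (fun answer i => answer ++ [l ++ [i]]) answer) []
    = res.flatMap (fun r => (PySem.List.pyRange 0 (b + 1) 1).map (fun i => r ++ [i])) := by
  have hinner : ∀ (l : List Int) (acc : List (List Int)),
      (PySem.List.pyRange 0 (b + 1) 1).foldl (fun answer i => answer ++ [l ++ [i]]) acc
      = acc ++ (PySem.List.pyRange 0 (b + 1) 1).map (fun i => l ++ [i]) := by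
    intro l acc
    induction (PySem.List.pyRange 0 (b + 1) 1) generalizing acc with
    | nil => simp
    | cons x xs ih => simp [List.foldl_cons, ih]
  have houter : ∀ (acc : List (List Int)),
      res.foldl
        (fun answer l =>
          (PySem.List.pyRange 0 (b + 1) 1).foldl (fun answer i => answer ++ [l ++ [i]]) answer) acc
      = acc ++ res.flatMap (fun r => (PySem.List.pyRange 0 (b + 1) 1).map (fun i => r ++ [i])) := by
    induction res with
    | nil => simp
    | cons r rs ih => intro acc; simp [List.foldl_cons, hinner, List.append_assoc, List.flatMap]
  simpa using houter []

-- A equals the fold, by induction on the list from the right.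
theorem bl_eq_alt (xs : List Int) : bounded_lists xs = bounded_lists_alt xs := by
  induction xs using List.reverseRecOn with
  | nil => simp [bounded_lists, bounded_lists_alt]
  | append_singleton ys b ih =>
    have hne : ys ++ [b] ≠ [] := by simp
    rw [bounded_lists.eq_def]
    split
    · simp_all
    · simp only [List.dropLast_concat, List.getLast_concat]
      rw [ih, bl_step_eq]
      simp [bounded_lists_alt, List.foldl_append]

-- ===== VERDICT (by name: the statement is the Claim_ definition above) =====
theorem bounded_lists_spec : Claim_equal_bounded_lists := by
  intro xs _
  exact bl_eq_alt xs
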